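-- pv_equiv track=rewrite | github.com/likai-xixi/sili-jian-orchestrator | scripts/evidence_collector.py | gate_recommendation
-- ===== SOURCE A (Python) =====
-- def gate_recommendation(
--     test_status: str,
--     build_status: str,
--     lint_status: str,
--     docs_status: str,
--     ci_status: str,
--     release_status: str,
--     rollback_status: str,
-- ) -> str:
--     statuses = [test_status, build_status, lint_status, docs_status, ci_status, release_status, rollback_status]
--     if any(status == "FAIL" for status in statuses):
--         return "BLOCKER"
--     if any(status == "SKIPPED" for status in statuses):
--         return "PASS_WITH_WARNING"
--     if any(status == "PASS_WITH_WARNING" for status in statuses):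
--         return "PASS_WITH_WARNING"
--     return "PASS"
-- ===== SOURCE B (Python) =====
-- _SEVERITY = {"FAIL": 3, "SKIPPED": 2, "PASS_WITH_WARNING": 2}
-- _VERDICT = {3: "BLOCKER", 2: "PASS_WITH_WARNING"}
--
-- def gate_recommendation(
--     test_status: str,
--     build_status: str,
--     lint_status: str,
--     docs_status: str,
--     ci_status: str,
--     release_status: str,
--     rollback_status: str,
-- ) -> str:
--     worst = max(
--         _SEVERITY.get(test_status, 0),
--         _SEVERITY.get(build_status, 0),
--         _SEVERITY.get(lint_status, 0),
--         _SEVERITY.get(docs_status, 0),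
--         _SEVERITY.get(ci_status, 0),
--         _SEVERITY.get(release_status, 0),
--         _SEVERITY.get(rollback_status, 0),
--     )
--     return _VERDICT.get(worst, "PASS")
-- ===== Notes on version B (the rewrite author's own statement) =====
-- stated objective: simpler
-- what changed: Replaces the three ordered any()-scans over the status list with a severity lookup per status, one max reduction, and a final table lookup from the maximal severity to the verdict.
import Mathlib
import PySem

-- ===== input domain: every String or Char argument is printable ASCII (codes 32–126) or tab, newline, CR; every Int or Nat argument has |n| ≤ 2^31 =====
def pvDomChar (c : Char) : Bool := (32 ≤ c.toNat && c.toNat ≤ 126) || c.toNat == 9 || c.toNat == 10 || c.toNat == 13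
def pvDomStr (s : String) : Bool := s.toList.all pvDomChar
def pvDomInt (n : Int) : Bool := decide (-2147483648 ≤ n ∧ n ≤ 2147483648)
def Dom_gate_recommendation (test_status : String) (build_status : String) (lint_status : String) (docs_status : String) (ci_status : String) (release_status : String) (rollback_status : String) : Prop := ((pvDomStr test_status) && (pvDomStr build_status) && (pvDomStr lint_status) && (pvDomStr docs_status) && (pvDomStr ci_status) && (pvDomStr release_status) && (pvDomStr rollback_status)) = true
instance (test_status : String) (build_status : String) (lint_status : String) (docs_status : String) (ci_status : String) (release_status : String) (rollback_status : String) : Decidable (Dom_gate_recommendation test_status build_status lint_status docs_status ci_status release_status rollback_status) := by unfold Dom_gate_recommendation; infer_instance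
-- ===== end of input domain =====

-- ===== PORT A =====
-- B replaces A's three ordered any()-scans with a per-status severity lookup, one max reduction, and a verdict lookup (objective: simpler).
def gate_recommendation (test_status : String) (build_status : String) (lint_status : String) (docs_status : String) (ci_status : String) (release_status : String) (rollback_status : String) : String :=
  let statuses := [test_status, build_status, lint_status, docs_status, ci_status, release_status, rollback_status]
  if statuses.any (fun status => status == "FAIL") then "BLOCKER"
  else if statuses.any (fun status => status == "SKIPPED") then "PASS_WITH_WARNING"
  else if statuses.any (fun status => status == "PASS_WITH_WARNING") then "PASS_WITH_WARNING"
  else "PASS"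

-- ===== PORT B =====
-- _SEVERITY.get(s, 0): exact port of the dict lookup with default (three literal keys)
def pvSeverityGet (s : String) : Int :=
  ((PySem.Dict.ofList [("FAIL", (3 : Int)), ("SKIPPED", 2), ("PASS_WITH_WARNING", 2)]).getD s 0)

-- _VERDICT.get(worst, "PASS"): exact port of the dict lookup with default
def pvVerdictGet (worst : Int) : String :=
  ((PySem.Dict.ofList [((3 : Int), "BLOCKER"), (2, "PASS_WITH_WARNING")]).getD worst "PASS")

def gate_recommendation_alt (test_status : String) (build_status : String) (lint_status : String) (docs_status : String) (ci_status : String) (release_status : String) (rollback_status : String) : String :=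
  -- Python max with 7 arguments = left-nested binary max
  let worst := max (max (max (max (max (max (pvSeverityGet test_status) (pvSeverityGet build_status)) (pvSeverityGet lint_status)) (pvSeverityGet docs_status)) (pvSeverityGet ci_status)) (pvSeverityGet release_status)) (pvSeverityGet rollback_status)
  pvVerdictGet worst

-- ===== PRECONDITION & SPEC =====
def Spec_gate_recommendation (test_status : String) (build_status : String) (lint_status : String) (docs_status : String) (ci_status : String) (release_status : String) (rollback_status : String) (out : String) : Prop := out = gate_recommendation_alt test_status build_status lint_status docs_status ci_status release_status rollback_status
instance (test_status : String) (build_status : String) (lint_status : String) (docs_status : String) (ci_status : String) (release_status : String) (rollback_status : String) (out : String) : Decidable (Spec_gate_recommendation test_status build_status lint_status docs_status ci_status release_status rollback_status out) := by unfold Spec_gate_recommendation; infer_instance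

-- ===== CLAIM (what is proved, stated in full; the proofs are below) =====
def Claim_equal_gate_recommendation : Prop := ∀ (test_status : String) (build_status : String) (lint_status : String) (docs_status : String) (ci_status : String) (release_status : String) (rollback_status : String), Dom_gate_recommendation test_status build_status lint_status docs_status ci_status release_status rollback_status → Spec_gate_recommendation test_status build_status lint_status docs_status ci_status release_status rollback_status (gate_recommendation test_status build_status lint_status docs_status ci_status release_status rollback_status)

-- ===== LEMMAS AND PROOFS =====

-- severity facts used by the main proof
theorem sev_le_three (s : String) : pvSeverityGet s ≤ 3 := by
  by_cases h1 : "FAIL" = s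
  · subst h1; decide
  by_cases h2 : "SKIPPED" = s
  · subst h2; decide
  by_cases h3 : "PASS_WITH_WARNING" = s
  · subst h3; decide
  · simp [pvSeverityGet, PySem.Dict.ofList, PySem.Dict.getD, PySem.Dict.get?, PySem.Dict.empty, PySem.Dict.update, PySem.Dict.insert, List.find?, beq_eq_false_iff_ne.mpr h1, beq_eq_false_iff_ne.mpr h2, beq_eq_false_iff_ne.mpr h3]

theorem sev_fail {s : String} (h : s = "FAIL") : pvSeverityGet s = 3 := by
  subst h; rfl

theorem sev_le_two {s : String} (h : s ≠ "FAIL") : pvSeverityGet s ≤ 2 := by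
  by_cases h2 : "SKIPPED" = s
  · subst h2; decide
  by_cases h3 : "PASS_WITH_WARNING" = s
  · subst h3; decide
  · simp [pvSeverityGet, PySem.Dict.ofList, PySem.Dict.getD, PySem.Dict.get?, PySem.Dict.empty, PySem.Dict.update, PySem.Dict.insert, List.find?, beq_eq_false_iff_ne.mpr (Ne.symm h), beq_eq_false_iff_ne.mpr h2, beq_eq_false_iff_ne.mpr h3]

theorem sev_two {s : String} (h : s = "SKIPPED" ∨ s = "PASS_WITH_WARNING") : pvSeverityGet s = 2 := by
  rcases h with h | h <;> subst h <;> rfl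

theorem sev_zero {s : String} (h1 : s ≠ "FAIL") (h2 : s ≠ "SKIPPED") (h3 : s ≠ "PASS_WITH_WARNING") :
    pvSeverityGet s = 0 := by
  simp [pvSeverityGet, PySem.Dict.ofList, PySem.Dict.getD, PySem.Dict.get?, PySem.Dict.empty, PySem.Dict.update, PySem.Dict.insert, List.find?, beq_eq_false_iff_ne.mpr (Ne.symm h1), beq_eq_false_iff_ne.mpr (Ne.symm h2), beq_eq_false_iff_ne.mpr (Ne.symm h3)]

theorem verdict_three : pvVerdictGet 3 = "BLOCKER" := rfl
theorem verdict_two : pvVerdictGet 2 = "PASS_WITH_WARNING" := rfl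
theorem verdict_zero : pvVerdictGet 0 = "PASS" := rfl

-- ===== VERDICT (by name: the statement is the Claim_ definition above) =====
theorem gate_recommendation_spec : Claim_equal_gate_recommendation := by
  intro t b l d c r rb _
  unfold Spec_gate_recommendation
  show gate_recommendation t b l d c r rb = gate_recommendation_alt t b l d c r rb
  simp only [gate_recommendation, gate_recommendation_alt, List.any_cons, List.any_nil,
    Bool.or_false, Bool.or_eq_true, beq_iff_eq]
  split_ifs with h1 h2 h3
  · -- some status is FAIL: the max severity is 3
    have hub : ∀ s : String, pvSeverityGet s ≤ 3 := sev_le_three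
    have hW : max (max (max (max (max (max (pvSeverityGet t) (pvSeverityGet b)) (pvSeverityGet l)) (pvSeverityGet d)) (pvSeverityGet c)) (pvSeverityGet r)) (pvSeverityGet rb) = 3 := by
      apply le_antisymm
      · simp only [max_le_iff]
        exact ⟨⟨⟨⟨⟨⟨hub t, hub b⟩, hub l⟩, hub d⟩, hub c⟩, hub r⟩, hub rb⟩
      · simp only [le_max_iff]
        rcases h1 with h | h | h | h | h | h | h <;> simp [sev_fail h]
    rw [hW, verdict_three]
  · -- no FAIL, some SKIPPED: the max severity is 2
    push Not at h1
    obtain ⟨n1, n2, n3, n4, n5, n6, n7⟩ := h1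
    have hW : max (max (max (max (max (max (pvSeverityGet t) (pvSeverityGet b)) (pvSeverityGet l)) (pvSeverityGet d)) (pvSeverityGet c)) (pvSeverityGet r)) (pvSeverityGet rb) = 2 := by
      apply le_antisymm
      · simp only [max_le_iff]
        exact ⟨⟨⟨⟨⟨⟨sev_le_two n1, sev_le_two n2⟩, sev_le_two n3⟩, sev_le_two n4⟩, sev_le_two n5⟩, sev_le_two n6⟩, sev_le_two n7⟩
      · simp only [le_max_iff]
        rcases h2 with h | h | h | h | h | h | h <;> simp [sev_two (Or.inl h)]
    rw [hW, verdict_two]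
  · -- no FAIL, no SKIPPED, some PASS_WITH_WARNING: the max severity is 2
    push Not at h1
    obtain ⟨n1, n2, n3, n4, n5, n6, n7⟩ := h1
    have hW : max (max (max (max (max (max (pvSeverityGet t) (pvSeverityGet b)) (pvSeverityGet l)) (pvSeverityGet d)) (pvSeverityGet c)) (pvSeverityGet r)) (pvSeverityGet rb) = 2 := by
      apply le_antisymm
      · simp only [max_le_iff]
        exact ⟨⟨⟨⟨⟨⟨sev_le_two n1, sev_le_two n2⟩, sev_le_two n3⟩, sev_le_two n4⟩, sev_le_two n5⟩, sev_le_two n6⟩, sev_le_two n7⟩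
      · simp only [le_max_iff]
        rcases h3 with h | h | h | h | h | h | h <;> simp [sev_two (Or.inr h)]
    rw [hW, verdict_two]
  · -- nothing flagged: every severity is 0
    push Not at h1 h2 h3
    obtain ⟨n1, n2, n3, n4, n5, n6, n7⟩ := h1
    obtain ⟨m1, m2, m3, m4, m5, m6, m7⟩ := h2
    obtain ⟨k1, k2, k3, k4, k5, k6, k7⟩ := h3
    rw [sev_zero n1 m1 k1, sev_zero n2 m2 k2, sev_zero n3 m3 k3, sev_zero n4 m4 k4,
        sev_zero n5 m5 k5, sev_zero n6 m6 k6, sev_zero n7 m7 k7]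
    simp [verdict_zero]
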